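-- pv_equiv track=rewrite | github.com/germanrud/python-algo-1 | recuperatorioPython.py | viajes_por_dia
-- ===== SOURCE A (Python) =====
-- def pertenece(s:list, x) -> bool:
--     estado = False
--     for i in range(len(s)):
--         if s[i] == x:
--             estado = True
--     return estado
--
-- def viajes_por_dia(viajes_diarios:dict[int,list[str]], usuarios:list[str]) -> dict[str,int]:
--     res:dict = dict()
--     for i in range(len(usuarios)):
--         contador:int = 0
--         for clave in viajes_diarios.keys():
--             if pertenece(viajes_diarios[clave],usuarios[i]):
--                 contador = contador + 1
--         res[usuarios[i]] = contador
--     return res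
-- ===== SOURCE B (Python) =====
-- def viajes_por_dia(viajes_diarios, usuarios):
--     res = {u: 0 for u in usuarios}
--     for dia in viajes_diarios.values():
--         for user in set(dia):
--             if user in res:
--                 res[user] += 1
--     return res
-- ===== Notes on version B (the rewrite author's own statement) =====
-- stated objective: faster
-- what changed: Inverts A's user-outer loop with a full inner scan per user into a single accumulation pass over the trip lists, maintaining a zero-initialized count dict and deduplicating each day's list with set().
import Mathlib
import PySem

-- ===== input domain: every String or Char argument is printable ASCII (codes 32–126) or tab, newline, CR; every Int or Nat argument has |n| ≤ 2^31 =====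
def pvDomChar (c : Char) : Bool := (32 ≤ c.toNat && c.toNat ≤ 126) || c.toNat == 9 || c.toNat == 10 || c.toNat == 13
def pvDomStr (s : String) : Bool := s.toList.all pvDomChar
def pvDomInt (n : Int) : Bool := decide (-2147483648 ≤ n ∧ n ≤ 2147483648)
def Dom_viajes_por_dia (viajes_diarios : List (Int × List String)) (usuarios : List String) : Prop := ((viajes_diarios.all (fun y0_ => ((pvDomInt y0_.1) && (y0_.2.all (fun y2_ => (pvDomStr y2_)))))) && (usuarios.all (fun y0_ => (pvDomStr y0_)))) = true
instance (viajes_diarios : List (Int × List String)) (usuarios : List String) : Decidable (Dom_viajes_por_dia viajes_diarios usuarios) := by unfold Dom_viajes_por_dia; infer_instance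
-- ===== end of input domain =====

-- ===== PORT A =====
-- B is a single accumulation pass over the trip lists instead of A's per-user rescan (see claim).
def pertenece (s : List String) (x : String) : Bool :=
  List.foldl (fun estado i => if PySem.List.pyGetD s i "" == x then true else estado) false
    (PySem.List.pyRange 0 (PySem.List.len s))

def viajes_por_dia (viajes_diarios : List (Int × List String)) (usuarios : List String) : List (String × Int) :=
  let vd := PySem.Dict.ofList viajes_diarios
  let res := List.foldl (fun res i =>
      let contador : Int := List.foldl (fun contador clave =>
          if pertenece (vd.getD clave []) (PySem.List.pyGetD usuarios i "") then contador + 1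
          else contador) 0 vd.keys
      res.insert (PySem.List.pyGetD usuarios i "") contador)
    PySem.Dict.empty (PySem.List.pyRange 0 (PySem.List.len usuarios))
  res.items

-- ===== PORT B =====
def viajes_por_dia_alt (viajes_diarios : List (Int × List String)) (usuarios : List String) : List (String × Int) :=
  let res0 := List.foldl (fun r u => r.insert u 0) PySem.Dict.empty usuarios
  let res := List.foldl (fun r dia =>
      List.foldl (fun r user => if r.contains user then r.modify user 0 (· + 1) else r) r
        (PySem.Set.ofList dia))
    res0 (PySem.Dict.ofList viajes_diarios).values
  res.items

-- ===== PRECONDITION & SPEC =====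
def Spec_viajes_por_dia (viajes_diarios : List (Int × List String)) (usuarios : List String) (out : List (String × Int)) : Prop := out = viajes_por_dia_alt viajes_diarios usuarios
instance (viajes_diarios : List (Int × List String)) (usuarios : List String) (out : List (String × Int)) : Decidable (Spec_viajes_por_dia viajes_diarios usuarios out) := by unfold Spec_viajes_por_dia; infer_instance

-- ===== CLAIM (what is proved, stated in full; the proofs are below) =====
def Claim_equal_viajes_por_dia : Prop := ∀ (viajes_diarios : List (Int × List String)) (usuarios : List String), Dom_viajes_por_dia viajes_diarios usuarios → Spec_viajes_por_dia viajes_diarios usuarios (viajes_por_dia viajes_diarios usuarios)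

-- ===== LEMMAS AND PROOFS =====

-- pertenece is list membership
theorem pertenece_eq_contains (s : List String) (x : String) : pertenece s x = s.contains x := by
  unfold pertenece
  rw [PySem.List.foldl_if_true_eq]
  rw [show (PySem.List.pyRange 0 (PySem.List.len s)).any (fun i => PySem.List.pyGetD s i "" == x)
      = ((PySem.List.pyRange 0 (PySem.List.len s)).map (fun i => PySem.List.pyGetD s i "")).any (· == x) by
        rw [List.any_map]; rfl]
  rw [PySem.List.map_pyGetD_pyRange_zero]
  simp [List.any_beq']

-- getD after A's build loop (insert key u with a value depending only on u)
theorem getD_foldl_insert_fun {g : String → Int} (us : List String) (d : PySem.Dict String Int) (k : String) :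
    (List.foldl (fun r u => r.insert u (g u)) d us).getD k 0
      = if k ∈ us then g k else d.getD k 0 := by
  induction us generalizing d with
  | nil => simp
  | cons u t ih =>
    simp only [List.foldl_cons, ih, List.mem_cons, PySem.Dict.getD_insert]
    by_cases hkt : k ∈ t <;> by_cases hku : k = u <;> simp [hkt, hku]

-- B's guarded-modify step preserves contains
theorem contains_step (r : PySem.Dict String Int) (x k : String) :
    (if r.contains x then r.modify x 0 (· + 1) else r).contains k = r.contains k := by
  by_cases hx : r.contains x = true
  · simp only [hx, if_true, PySem.Dict.contains_modify]
    by_cases hk : k = x <;> simp [hk, hx]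
  · simp [hx]

-- getD after one day's deduplicated pass
theorem getD_day (S : List String) (hS : S.Nodup) (r : PySem.Dict String Int) (k : String) :
    (List.foldl (fun r user => if r.contains user then r.modify user 0 (· + 1) else r) r S).getD k 0
      = r.getD k 0 + (if r.contains k ∧ k ∈ S then 1 else 0) := by
  induction S generalizing r with
  | nil => simp
  | cons x t ih =>
    have hxt : x ∉ t := (List.nodup_cons.mp hS).1
    have ht : t.Nodup := (List.nodup_cons.mp hS).2
    simp only [List.foldl_cons]
    rw [ih ht]
    rw [show (if r.contains x then r.modify x 0 (· + 1) else r).contains k = r.contains k from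
      contains_step r x k]
    by_cases hx : r.contains x = true
    · simp only [hx, if_true, PySem.Dict.getD_modify]
      by_cases hk : k = x
      · subst hk
        simp [hx, hxt]
      · by_cases hkt : k ∈ t <;> simp [hk, hkt]
    · simp only [hx, Bool.false_eq_true, if_false, List.mem_cons]
      by_cases hk : k = x
      · subst hk; simp [hx]
      · simp [hk]

-- contains is preserved through a whole day's pass
theorem contains_day (S : List String) (r : PySem.Dict String Int) (k : String) :
    (List.foldl (fun r user => if r.contains user then r.modify user 0 (· + 1) else r) r S).contains k
      = r.contains k := by
  induction S generalizing r with
  | nil => rfl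
  | cons x t ih => simp only [List.foldl_cons]; rw [ih, contains_step]

-- keys are preserved through a whole day's pass
theorem keys_day (S : List String) (r : PySem.Dict String Int) :
    (List.foldl (fun r user => if r.contains user then r.modify user 0 (· + 1) else r) r S).keys
      = r.keys := by
  induction S generalizing r with
  | nil => rfl
  | cons x t ih =>
    simp only [List.foldl_cons]
    rw [ih]
    by_cases hx : r.contains x = true
    · simp only [hx, if_true, PySem.Dict.keys_modify, PySem.Dict.keys_insert_of_contains r _ hx]
    · simp [hx]

-- getD after B's whole trip loop
theorem getD_days (days : List (List String)) (r : PySem.Dict String Int) (k : String) :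
    (List.foldl (fun r dia =>
        List.foldl (fun r user => if r.contains user then r.modify user 0 (· + 1) else r) r
          (PySem.Set.ofList dia)) r days).getD k 0
      = r.getD k 0 + (if r.contains k then ((days.countP (fun dia => dia.contains k) : Nat) : Int) else 0) := by
  induction days generalizing r with
  | nil => simp
  | cons dia t ih =>
    simp only [List.foldl_cons]
    rw [ih, contains_day, getD_day _ (PySem.Set.nodup_ofList dia) r k]
    have hmem : (k ∈ PySem.Set.ofList dia) ↔ dia.contains k = true := by
      rw [PySem.Set.mem_ofList]; simp [List.contains_iff_exists_mem_beq, eq_comm]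
    rw [List.countP_cons]
    by_cases hc : r.contains k = true
    · by_cases hd : dia.contains k = true
      · simp only [hc, if_true, hmem, hd, and_true, if_pos trivial]
        push_cast
        ring
      · have hnm : ¬ (k ∈ PySem.Set.ofList dia) := by rw [hmem]; exact hd
        have hkd : k ∉ dia := fun h => hnm ((PySem.Set.mem_ofList dia k).mpr h)
        simp [hc, hkd, hnm]
    · simp [hc]

-- keys after B's whole trip loop
theorem keys_days (days : List (List String)) (r : PySem.Dict String Int) :
    (List.foldl (fun r dia =>
        List.foldl (fun r user => if r.contains user then r.modify user 0 (· + 1) else r) r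
          (PySem.Set.ofList dia)) r days).keys = r.keys := by
  induction days generalizing r with
  | nil => rfl
  | cons dia t ih => simp only [List.foldl_cons]; rw [ih, keys_day]

-- ===== VERDICT (by name: the statement is the Claim_ definition above) =====
theorem viajes_por_dia_spec : Claim_equal_viajes_por_dia := by
  intro viajes_diarios usuarios _
  unfold Spec_viajes_por_dia
  simp only [viajes_por_dia, viajes_por_dia_alt]
  set vd := PySem.Dict.ofList viajes_diarios with hvd
  -- A's outer loop: index loop → list loop
  rw [show List.foldl (fun res i =>
        res.insert (PySem.List.pyGetD usuarios i "")
          (List.foldl (fun contador clave =>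
            if pertenece (vd.getD clave []) (PySem.List.pyGetD usuarios i "") then contador + 1
            else contador) (0 : Int) vd.keys))
        (PySem.Dict.empty : PySem.Dict String Int) (PySem.List.pyRange 0 (PySem.List.len usuarios))
      = List.foldl (fun res u =>
          res.insert u (List.foldl (fun contador clave =>
            if pertenece (vd.getD clave []) u then contador + 1 else contador) (0 : Int) vd.keys))
          (PySem.Dict.empty : PySem.Dict String Int) usuarios from by
        rw [PySem.List.foldl_pyRange_pyGetD usuarios ""
          (fun res u => res.insert u (List.foldl (fun contador clave =>
            if pertenece (vd.getD clave []) u then contador + 1 else contador) (0 : Int) vd.keys))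
          (PySem.Dict.empty : PySem.Dict String Int) (le_refl 0)]
        simp]
  set DA := List.foldl (fun res u =>
      res.insert u (List.foldl (fun contador clave =>
        if pertenece (vd.getD clave []) u then contador + 1 else contador) (0 : Int) vd.keys))
      (PySem.Dict.empty : PySem.Dict String Int) usuarios with hDA
  set D0 := List.foldl (fun r u => r.insert u (0 : Int))
      (PySem.Dict.empty : PySem.Dict String Int) usuarios with hD0
  set DB := List.foldl (fun r dia =>
      List.foldl (fun r user => if r.contains user then r.modify user 0 (· + 1) else r) r
        (PySem.Set.ofList dia)) D0 vd.values with hDB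
  -- keys
  have hkA : DA.keys = PySem.Set.ofList usuarios := by
    rw [hDA, PySem.Dict.keys_foldl_insert]
    rfl
  have hk0 : D0.keys = PySem.Set.ofList usuarios := by
    rw [hD0, PySem.Dict.keys_foldl_insert]
    rfl
  have hkB : DB.keys = PySem.Set.ofList usuarios := by
    rw [hDB, keys_days, hk0]
  have hndA : DA.keys.Nodup := by rw [hkA]; exact PySem.Set.nodup_ofList usuarios
  have hndB : DB.keys.Nodup := by rw [hkB]; exact PySem.Set.nodup_ofList usuarios
  -- items via keys + getD
  rw [PySem.Dict.items_eq_map_keys DA hndA 0, PySem.Dict.items_eq_map_keys DB hndB 0, hkA, hkB]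
  apply List.map_congr_left
  intro k hk
  have hkus : k ∈ usuarios := (PySem.Set.mem_ofList usuarios k).mp hk
  -- A's value at k
  have hA : DA.getD k 0 = ((vd.values.countP (fun dia => dia.contains k) : Nat) : Int) := by
    rw [hDA, getD_foldl_insert_fun, if_pos hkus, PySem.List.foldl_if_add_one, zero_add]
    congr 1
    rw [PySem.Dict.values_eq_map_keys vd (PySem.Dict.nodup_keys_ofList viajes_diarios) []]
    rw [List.countP_map]
    apply List.countP_congr
    intro clave _
    simp [Function.comp, pertenece_eq_contains]
  -- B's value at k
  have hB : DB.getD k 0 = ((vd.values.countP (fun dia => dia.contains k) : Nat) : Int) := by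
    rw [hDB, getD_days]
    have h0 : D0.getD k 0 = 0 := by
      rw [hD0, getD_foldl_insert_fun]
      by_cases h : k ∈ usuarios <;> simp [h]
    have hc : D0.contains k = true := by
      rw [PySem.Dict.contains_eq_decide_mem_keys, hk0]
      simp [hk]
    rw [h0, hc, if_pos rfl, zero_add]
  rw [hA, hB]
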